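-- pv_equiv track=rewrite | github.com/shz545/MIXER | hcmvmda4ml.py | hcmvm_expand
-- ===== SOURCE A (Python) =====
-- from collections import Counter
--
-- def to_binary(val, bits=8):
--     return [(val >> i) & 1 for i in range(bits)]
--
-- def hcmvm_expand(matrix, bits=8):
--     expr_counter = Counter()
--     for row in matrix:
--         for val in row:
--             rep = to_binary(int(val), bits)
--             for i, bit in enumerate(rep):
--                 if bit != 0:
--                     expr_counter[f"shift_{i}"] += 1
--     adder_count = sum(expr_counter.values())
--     # latency: 最大 shift 層（critical path）
--     latency = max([int(k.split('_')[1]) for k in expr_counter.keys()]) + 1 if expr_counter else 0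
--     # ops: 所有 shift-and-add 的總數
--     ops = adder_count
--     return expr_counter, adder_count, latency, ops
-- ===== SOURCE B (Python) =====
-- from collections import Counter
--
-- def hcmvm_expand(matrix, bits=8):
--     # One pass per value: mask once, split into little-endian bytes once (linear),
--     # then walk only each byte's significant bits; adders are counted on the fly
--     # instead of re-summing the counter afterwards, and no per-value bits-long
--     # binary list is ever materialised.
--     mask = (1 << bits) - 1 if bits > 0 else 0
--     expr_counter = Counter()
--     adder_count = 0
--     for row in matrix:
--         for val in row:
--             m = int(val) & mask
--             bs = m.to_bytes((m.bit_length() + 7) // 8, 'little') if m else b''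
--             for byte_idx, byte in enumerate(bs):
--                 i = 8 * byte_idx
--                 while byte:
--                     if byte & 1:
--                         expr_counter[f"shift_{i}"] += 1
--                         adder_count += 1
--                     byte >>= 1
--                     i += 1
--     latency = max([int(k.split('_')[1]) for k in expr_counter.keys()]) + 1 if expr_counter else 0
--     return expr_counter, adder_count, latency, adder_count
-- ===== Notes on version B (the rewrite author's own statement) =====
-- stated objective: alternative
-- what changed: Instead of materialising a bits-long binary list per value and enumerating it, B masks each value once and walks only its significant bits with a halving loop, counting adders on the fly instead of re-summing the counter afterwards.
import Mathlib
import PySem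

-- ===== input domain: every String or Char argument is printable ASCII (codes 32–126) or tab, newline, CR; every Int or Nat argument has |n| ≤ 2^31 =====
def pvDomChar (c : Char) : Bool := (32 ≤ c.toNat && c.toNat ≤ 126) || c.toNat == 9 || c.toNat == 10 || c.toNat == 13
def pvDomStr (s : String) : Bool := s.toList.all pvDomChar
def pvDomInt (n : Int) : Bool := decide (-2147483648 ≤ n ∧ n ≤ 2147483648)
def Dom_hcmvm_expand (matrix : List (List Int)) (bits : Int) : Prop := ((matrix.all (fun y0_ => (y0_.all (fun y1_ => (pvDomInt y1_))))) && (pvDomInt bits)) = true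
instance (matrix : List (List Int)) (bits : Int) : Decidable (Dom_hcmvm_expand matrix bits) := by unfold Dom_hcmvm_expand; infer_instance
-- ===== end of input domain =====

-- B replaces the per-value bits-long binary list and the post-hoc adder sum by a
-- mask + little-endian byte split with a per-byte bit walk, counting adders on the
-- fly (objective: alternative; return value identical, including counter order).

-- ===== PORT A =====
def to_binary (val : Int) (bits : Int) : List Int :=
  (PySem.List.pyRange 0 bits 1).map (fun i => PySem.Int.band (val >>> i.toNat) 1)

def hcmvm_expand (matrix : List (List Int)) (bits : Int) : (List (String × Int)) × Int × Int × Int :=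
  let ec : PySem.Dict String Int :=
    matrix.foldl (fun d row =>
      row.foldl (fun d val =>
        (PySem.List.enumerate (to_binary val bits) 0).foldl (fun d p =>
          if p.2 ≠ 0 then d.modify ("shift_" ++ PySem.Int.toStr p.1) 0 (· + 1) else d) d) d)
      PySem.Dict.empty
  let adder_count : Int := ec.values.sum
  -- the pyGetD default "" and the (ofStr? _).getD 0 default are never reached:
  -- every key has the form "shift_<digits>", so split yields two pieces and int() returns
  let latency : Int :=
    if ec.size ≠ 0 then
      (PySem.List.max? (ec.keys.map (fun k =>
        (PySem.Int.ofStr? (PySem.List.pyGetD ((PySem.Str.split? k "_").getD []) 1 "")).getD 0))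
        (fun x => x)).getD 0 + 1
    else 0
  (ec.items, adder_count, latency, adder_count)

-- ===== PORT B =====
-- 'while m:' — structural recursion with fuel ≥ m (the loop halves m, so m iterations
-- are always enough fuel; the fuel-exhausted branch is unreachable).
def pvBitLoopF (fuel : Nat) (m : Nat) (i : Int) (d : PySem.Dict String Int) (adder : Int) :
    PySem.Dict String Int × Int :=
  match fuel with
  | 0 => (d, adder)
  | fuel + 1 =>
    if m = 0 then (d, adder)
    else
      let d' := if m &&& 1 ≠ 0 then d.modify ("shift_" ++ PySem.Int.toStr i) 0 (· + 1) else d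
      let adder' := if m &&& 1 ≠ 0 then adder + 1 else adder
      pvBitLoopF fuel (m >>> 1) (i + 1) d' adder'

-- m = int(val) & mask is nonnegative, so it is carried as a Nat (Python-exact here)
def pvBitLoop (m : Nat) (i : Int) (d : PySem.Dict String Int) (adder : Int) :
    PySem.Dict String Int × Int :=
  pvBitLoopF m m i d adder

-- hand port of m.to_bytes((m.bit_length() + 7) // 8, 'little') if m else b'':
-- the little-endian byte string of m is exactly its base-256 digits, low byte first,
-- with no trailing zero byte (the computed length makes the top byte nonzero); exact
-- for every m : Nat.  Structural recursion with fuel ≥ m (the loop divides by 256).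
def pvBytesF (fuel : Nat) (m : Nat) : List Nat :=
  match fuel with
  | 0 => []
  | fuel + 1 => if m = 0 then [] else (m % 256) :: pvBytesF fuel (m / 256)

def pvBytes (m : Nat) : List Nat := pvBytesF m m

def hcmvm_expand_alt (matrix : List (List Int)) (bits : Int) : (List (String × Int)) × Int × Int × Int :=
  let mask : Int := if 0 < bits then (1 <<< bits.toNat) - 1 else 0
  let st : PySem.Dict String Int × Int :=
    matrix.foldl (fun st row =>
      row.foldl (fun st val =>
        (PySem.List.enumerate (pvBytes (PySem.Int.band val mask).toNat) 0).foldl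
          (fun st p => pvBitLoop p.2 (8 * p.1) st.1 st.2) st) st)
      (PySem.Dict.empty, 0)
  let latency : Int :=
    if st.1.size ≠ 0 then
      (PySem.List.max? (st.1.keys.map (fun k =>
        (PySem.Int.ofStr? (PySem.List.pyGetD ((PySem.Str.split? k "_").getD []) 1 "")).getD 0))
        (fun x => x)).getD 0 + 1
    else 0
  (st.1.items, st.2, latency, st.2)

-- ===== PRECONDITION & SPEC =====
def Spec_hcmvm_expand (matrix : List (List Int)) (bits : Int) (out : (List (String × Int)) × Int × Int × Int) : Prop := out = hcmvm_expand_alt matrix bits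
instance (matrix : List (List Int)) (bits : Int) (out : (List (String × Int)) × Int × Int × Int) : Decidable (Spec_hcmvm_expand matrix bits out) := by unfold Spec_hcmvm_expand; infer_instance

-- ===== CLAIM (what is proved, stated in full; the proofs are below) =====
def Claim_equal_hcmvm_expand : Prop := ∀ (matrix : List (List Int)) (bits : Int), Dom_hcmvm_expand matrix bits → Spec_hcmvm_expand matrix bits (hcmvm_expand matrix bits)

-- ===== LEMMAS AND PROOFS =====

-- ghost data for the proofs: the stream of shift indices a value contributes, low bit first
def pvKey (i : Int) : String := "shift_" ++ PySem.Int.toStr i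

def pvBump (d : PySem.Dict String Int) (i : Int) : PySem.Dict String Int :=
  d.modify (pvKey i) 0 (· + 1)

def pvBumps (m : Nat) (i : Int) : List Int :=
  if hz : m = 0 then [] else (if m % 2 = 1 then [i] else []) ++ pvBumps (m / 2) (i + 1)
termination_by m
decreasing_by exact Nat.div_lt_self (Nat.pos_of_ne_zero hz) one_lt_two

def pvIdxs (bits : Int) (val : Int) : List Int :=
  pvBumps ((val % ((2:Int)^bits.toNat)).toNat) 0

def pvAll (matrix : List (List Int)) (bits : Int) : List Int :=
  matrix.flatMap (fun row => row.flatMap (pvIdxs bits))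

lemma pvBumps_zero (i : Int) : pvBumps 0 i = [] := by
  rw [pvBumps]; simp

lemma pvBumps_unfold (m : Nat) (i : Int) :
    pvBumps m i = (if m % 2 = 1 then [i] else []) ++ pvBumps (m / 2) (i + 1) := by
  by_cases h : m = 0
  · subst h; simp [pvBumps_zero]
  · rw [pvBumps]; simp [h]

lemma pvParity (val : Int) (n : Nat) : (val % ((2:Int)^(n+1))) % 2 = val % 2 :=
  Int.emod_emod_of_dvd _ ⟨2^n, by ring⟩

lemma pvHalve (val : Int) (n : Nat) : (val % ((2:Int)^(n+1))) / 2 = (val / 2) % 2^n := by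
  have h2 : ((2:Int)^n) > 0 := by positivity
  have hr0 : 0 ≤ val % 2 := Int.emod_nonneg _ (by norm_num)
  have hr1 : val % 2 < 2 := Int.emod_lt_of_pos _ (by norm_num)
  have hs0 : 0 ≤ (val/2) % 2^n := Int.emod_nonneg _ (by positivity)
  have hs1 : (val/2) % 2^n < 2^n := Int.emod_lt_of_pos _ h2
  have hM : val % ((2:Int)^(n+1)) = 2*((val/2) % 2^n) + val % 2 := by
    have hq := Int.mul_ediv_add_emod val 2
    have hsq := Int.mul_ediv_add_emod (val/2) (2^n)
    have hval : val = ((2*((val/2) % 2^n) + val % 2) + 2^(n+1) * ((val/2)/2^n)) := by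
      rw [pow_succ]; linarith
    conv_lhs => rw [hval]
    rw [Int.add_mul_emod_self_left, Int.emod_eq_of_lt (by linarith) (by rw [pow_succ]; linarith)]
  rw [hM]; omega

lemma pvBandMask (val : Int) (n : Nat) :
    PySem.Int.band val ((2:Int)^n - 1) = val % ((2:Int)^n) := by
  have hN : ((2^n : Nat) : Int) = (2:Int)^n := by push_cast; ring
  have hN1 : (1:Nat) ≤ 2^n := Nat.one_le_two_pow
  unfold PySem.Int.band
  by_cases h : 0 ≤ val
  · have hb : (0:Int) ≤ 2^n - 1 := by omega
    simp only [h, hb, if_true]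
    have ht : ((2:Int)^n - 1).toNat = 2^n - 1 := by omega
    rw [ht, Nat.and_two_pow_sub_one_eq_mod]
    have : val = ((val.toNat : Nat) : Int) := by omega
    rw [this]
    push_cast
    rfl
  · have hb : (0:Int) ≤ 2^n - 1 := by omega
    simp only [h, hb, if_true, if_false]
    have ht : ((2:Int)^n - 1).toNat = 2^n - 1 := by omega
    rw [ht]
    set c : Nat := (-val - 1).toNat with hc
    have hcv : (c : Int) = -val - 1 := by omega
    rw [Nat.and_comm, Nat.and_two_pow_sub_one_eq_mod]
    -- goal: ↑(2^n - 1 - c % 2^n) = val % 2^n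
    have hmodlt : c % 2^n < 2^n := Nat.mod_lt _ (by omega)
    have hq := Nat.div_add_mod c (2^n)
    have hdecomp : val = ((2:Int)^n - 1 - (c % 2^n : Nat)) + (2:Int)^n * (-((c / 2^n : Nat) : Int) - 1) := by
      have : (c:Int) = (2:Int)^n * ((c / 2^n : Nat) : Int) + ((c % 2^n : Nat) : Int) := by
        exact_mod_cast congrArg (fun x : Nat => (x : Int)) hq.symm
      have hval : val = -(c:Int) - 1 := by omega
      rw [hval, this]; ring
    conv_rhs => rw [hdecomp]
    rw [Int.add_mul_emod_self_left, Int.emod_eq_of_lt (by omega) (by omega)]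
    omega


lemma pvMasterA : ∀ (n : Nat) (val s : Int) (d : PySem.Dict String Int),
    (PySem.List.enumerate ((List.range n).map (fun (k : Nat) => PySem.Int.band (val >>> k) 1)) s).foldl
      (fun d p => if p.2 ≠ 0 then d.modify ("shift_" ++ PySem.Int.toStr p.1) 0 (· + 1) else d) d
    = (pvBumps ((val % ((2:Int)^n)).toNat) s).foldl pvBump d := by
  intro n
  induction n with
  | zero =>
    intro val s d
    simp [pvBumps_zero]
  | succ n ih =>
    intro val s d
    have hM0 : 0 ≤ val % ((2:Int)^(n+1)) := Int.emod_nonneg _ (by positivity)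
    have hM0' : 0 ≤ (val / 2) % ((2:Int)^n) := Int.emod_nonneg _ (by positivity)
    have hpar := pvParity val n
    have hdiv := pvHalve val n
    have hb1 : PySem.Int.band val 1 = val % 2 := by
      rw [PySem.Int.band_one, PySem.Int.mod_eq_emod_of_pos]; norm_num
    have hsh : val >>> (1:Nat) = val / 2 := by
      rw [Int.shiftRight_eq_div_pow]; norm_num
    rw [List.range_succ_eq_map, List.map_cons, List.map_map, PySem.List.enumerate_cons,
      List.foldl_cons]
    have hfun : ((fun (k : Nat) => PySem.Int.band (val >>> k) 1) ∘ Nat.succ)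
        = (fun (k : Nat) => PySem.Int.band ((val >>> (1:Nat)) >>> k) 1) := by
      funext k
      simp only [Function.comp_apply, Nat.succ_eq_one_add, Int.shiftRight_add]
    rw [hfun, ih (val >>> (1:Nat)) (s+1)]
    rw [pvBumps_unfold ((val % ((2:Int)^(n+1))).toNat) s, List.foldl_append]
    have hd2 : ((val % ((2:Int)^(n+1))).toNat) / 2 = (((val >>> (1:Nat)) % ((2:Int)^n)).toNat) := by
      rw [hsh]; omega
    rw [hd2]
    congr 1
    by_cases hp : val % 2 = 0
    · have hc1 : PySem.Int.band (val >>> (0:Nat)) 1 = 0 := by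
        rw [Int.shiftRight_zero, hb1, hp]
      have hc2 : ¬ ((val % ((2:Int)^(n+1))).toNat % 2 = 1) := by omega
      simp [hc2, hb1, hp]
    · have hc1 : PySem.Int.band (val >>> (0:Nat)) 1 ≠ 0 := by
        rw [Int.shiftRight_zero, hb1]; exact hp
      have hc2 : (val % ((2:Int)^(n+1))).toNat % 2 = 1 := by
        have h20 : 0 ≤ val % 2 := Int.emod_nonneg _ (by norm_num)
        have h21 : val % 2 < 2 := Int.emod_lt_of_pos _ (by norm_num)
        omega
      simp [hc2, hb1, hp, pvBump, pvKey]

lemma pvBitLoopF_spec : ∀ (fuel : Nat) (m : Nat), m ≤ fuel → ∀ (i : Int) (d : PySem.Dict String Int) (a : Int),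
    pvBitLoopF fuel m i d a = ((pvBumps m i).foldl pvBump d, a + ((pvBumps m i).length : Int)) := by
  intro fuel
  induction fuel with
  | zero =>
    intro m hm i d a
    interval_cases m
    simp [pvBitLoopF, pvBumps_zero]
  | succ fuel ih =>
    intro m hm i d a
    by_cases h0 : m = 0
    · subst h0; simp [pvBitLoopF, pvBumps_zero]
    · rw [pvBitLoopF]
      simp only [h0, if_false]
      rw [Nat.shiftRight_one, Nat.and_one_is_mod]
      rw [ih (m / 2) (by omega) (i + 1)]
      rw [pvBumps_unfold m i]
      by_cases hp : m % 2 = 1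
      · simp only [hp, if_pos, List.foldl_append, List.length_append]
        simp [pvBump, pvKey]
        ring_nf
      · have hp0 : m % 2 = 0 := by omega
        simp [hp0]

lemma pvElemA (bits val : Int) (d : PySem.Dict String Int) :
    (PySem.List.enumerate (to_binary val bits) 0).foldl
      (fun d p => if p.2 ≠ 0 then d.modify ("shift_" ++ PySem.Int.toStr p.1) 0 (· + 1) else d) d
    = (pvIdxs bits val).foldl pvBump d := by
  unfold to_binary
  rw [PySem.List.pyRange_one, List.map_map]
  simp only [Function.comp_def, zero_add, Int.toNat_natCast, Int.shiftRight_natCast_right,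
    sub_zero]
  exact pvMasterA bits.toNat val 0 d

lemma pvBumps_split : ∀ (k m : Nat) (i : Int),
    pvBumps m i = pvBumps (m % 2^k) i ++ pvBumps (m / 2^k) (i + (k : Int)) := by
  intro k
  induction k with
  | zero => intro m i; simp [Nat.mod_one, pvBumps_zero]
  | succ k ih =>
    intro m i
    rw [pvBumps_unfold m i, pvBumps_unfold (m % 2^(k+1)) i]
    have h1 : m % 2^(k+1) % 2 = m % 2 := Nat.mod_mod_of_dvd _ ⟨2^k, by ring⟩
    have h2 : m % 2^(k+1) / 2 = m / 2 % 2^k := by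
      rw [show (2:Nat)^(k+1) = 2 * 2^k from by ring, Nat.mod_mul_right_div_self]
    have h3 : m / 2^(k+1) = m / 2 / 2^k := by
      rw [Nat.div_div_eq_div_mul, show (2:Nat)^(k+1) = 2 * 2^k from by ring]
    rw [h1, h2, h3, ih (m/2) (i+1), List.append_assoc]
    have h4 : i + 1 + (k : Int) = i + ((k : Nat) + 1 : Nat) := by push_cast; ring
    rw [h4]

lemma pvBytesSpec : ∀ (fuel m : Nat), m ≤ fuel → ∀ (c : Int) (d : PySem.Dict String Int) (a : Int),
    (PySem.List.enumerate (pvBytesF fuel m) c).foldl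
      (fun st p => pvBitLoop p.2 (8 * p.1) st.1 st.2) (d, a)
    = ((pvBumps m (8 * c)).foldl pvBump d, a + ((pvBumps m (8 * c)).length : Int)) := by
  intro fuel
  induction fuel with
  | zero =>
    intro m hm c d a
    interval_cases m
    simp [pvBytesF, pvBumps_zero]
  | succ fuel ih =>
    intro m hm c d a
    by_cases h0 : m = 0
    · subst h0; simp [pvBytesF, pvBumps_zero]
    · rw [pvBytesF]
      simp only [h0, if_false]
      rw [PySem.List.enumerate_cons, List.foldl_cons]
      have hstep : pvBitLoop (m % 256) (8 * c) d a
          = ((pvBumps (m % 256) (8 * c)).foldl pvBump d,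
              a + ((pvBumps (m % 256) (8 * c)).length : Int)) :=
        pvBitLoopF_spec _ _ le_rfl _ d a
      rw [hstep, ih (m / 256) (by omega) (c + 1)]
      have hsplit := pvBumps_split 8 m (8 * c)
      rw [show (2:Nat)^8 = 256 from by norm_num] at hsplit
      rw [show (8 : Int) * c + (8 : Nat) = 8 * (c + 1) from by push_cast; ring] at hsplit
      rw [hsplit, List.foldl_append, List.length_append]
      push_cast
      ring_nf

lemma pvElemB (bits val : Int) (d : PySem.Dict String Int) (a : Int) :
    (PySem.List.enumerate (pvBytes
        (PySem.Int.band val (if 0 < bits then ((1 <<< bits.toNat : Nat) : Int) - 1 else 0)).toNat) 0).foldl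
      (fun st p => pvBitLoop p.2 (8 * p.1) st.1 st.2) (d, a)
    = ((pvIdxs bits val).foldl pvBump d, a + ((pvIdxs bits val).length : Int)) := by
  have hm : (PySem.Int.band val (if 0 < bits then ((1 <<< bits.toNat : Nat) : Int) - 1 else 0)).toNat
      = ((val % ((2:Int)^bits.toNat)).toNat) := by
    by_cases hb : 0 < bits
    · simp only [hb, if_true, Nat.one_shiftLeft]
      rw [show (((2^bits.toNat : Nat) : Int)) - 1 = (2:Int)^bits.toNat - 1 from by push_cast; ring,
        pvBandMask]
    · have h0 : bits.toNat = 0 := by omega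
      simp [hb, h0, PySem.Int.band_zero]
  rw [hm]
  have h := pvBytesSpec _ _ (le_refl ((val % ((2:Int)^bits.toNat)).toNat)) 0 d a
  rw [show (8 : Int) * 0 = 0 from by ring] at h
  exact h

lemma pvRowA (bits : Int) : ∀ (row : List Int) (d : PySem.Dict String Int),
    row.foldl (fun d val =>
        (PySem.List.enumerate (to_binary val bits) 0).foldl (fun d p =>
          if p.2 ≠ 0 then d.modify ("shift_" ++ PySem.Int.toStr p.1) 0 (· + 1) else d) d) d
    = (row.flatMap (pvIdxs bits)).foldl pvBump d := by
  intro row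
  induction row with
  | nil => intro d; simp
  | cons v t ih =>
    intro d
    rw [List.foldl_cons, List.flatMap_cons, List.foldl_append, pvElemA, ih]

lemma pvMatA (bits : Int) : ∀ (matrix : List (List Int)) (d : PySem.Dict String Int),
    matrix.foldl (fun d row =>
      row.foldl (fun d val =>
        (PySem.List.enumerate (to_binary val bits) 0).foldl (fun d p =>
          if p.2 ≠ 0 then d.modify ("shift_" ++ PySem.Int.toStr p.1) 0 (· + 1) else d) d) d) d
    = (pvAll matrix bits).foldl pvBump d := by
  intro matrix
  induction matrix with
  | nil => intro d; simp [pvAll]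
  | cons row t ih =>
    intro d
    simp only [pvAll, List.flatMap_cons, List.foldl_append] at *
    rw [List.foldl_cons, ih, pvRowA]

lemma pvRowB (bits : Int) : ∀ (row : List Int) (d : PySem.Dict String Int) (a : Int),
    row.foldl (fun st val =>
        (PySem.List.enumerate (pvBytes
            (PySem.Int.band val (if 0 < bits then ((1 <<< bits.toNat : Nat) : Int) - 1 else 0)).toNat) 0).foldl
          (fun st p => pvBitLoop p.2 (8 * p.1) st.1 st.2) st)
      (d, a)
    = ((row.flatMap (pvIdxs bits)).foldl pvBump d,
        a + (((row.flatMap (pvIdxs bits)).length : Nat) : Int)) := by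
  intro row
  induction row with
  | nil => intro d a; simp
  | cons v t ih =>
    intro d a
    rw [List.foldl_cons, pvElemB, ih, List.flatMap_cons, List.foldl_append, List.length_append]
    push_cast
    ring_nf

lemma pvMatB (bits : Int) : ∀ (matrix : List (List Int)) (d : PySem.Dict String Int) (a : Int),
    matrix.foldl (fun st row =>
      row.foldl (fun st val =>
        (PySem.List.enumerate (pvBytes
            (PySem.Int.band val (if 0 < bits then ((1 <<< bits.toNat : Nat) : Int) - 1 else 0)).toNat) 0).foldl
          (fun st p => pvBitLoop p.2 (8 * p.1) st.1 st.2) st) st)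
      (d, a)
    = ((pvAll matrix bits).foldl pvBump d, a + ((pvAll matrix bits).length : Int)) := by
  intro matrix
  induction matrix with
  | nil => intro d a; simp [pvAll]
  | cons row t ih =>
    intro d a
    simp only [pvAll, List.flatMap_cons, List.foldl_append, List.length_append] at *
    rw [List.foldl_cons, pvRowB, ih]
    push_cast
    ring_nf

lemma pvFoldl_bump_eq_counter (l : List Int) :
    l.foldl pvBump PySem.Dict.empty = PySem.Dict.counter (l.map pvKey) := by
  rw [PySem.Dict.counter_eq_foldl, List.foldl_map]
  rfl

lemma pvSumCounter (ks : List String) :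
    (PySem.Dict.counter ks).values.sum = (ks.length : Int) := by
  have hperm : (PySem.Set.ofList ks : List String).Perm ks.dedup := by
    apply (List.perm_ext_iff_of_nodup (PySem.Set.nodup_ofList ks) ks.nodup_dedup).mpr
    intro a; rw [PySem.Set.mem_ofList, List.mem_dedup]
  have h1 : ((PySem.Set.ofList ks : List String).map (fun k => ks.count k)).sum = ks.length := by
    rw [(hperm.map _).sum_eq, List.sum_map_count_dedup_eq_length]
  show ((PySem.Dict.counter ks).items.map (fun p => p.2)).sum = (ks.length : Int)
  rw [PySem.Dict.items_counter, List.map_map]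
  simp only [← h1, Nat.cast_list_sum, List.map_map]
  rfl

-- ===== VERDICT (by name: the statement is the Claim_ definition above) =====
theorem hcmvm_expand_spec : Claim_equal_hcmvm_expand := by
  intro matrix bits _
  unfold Spec_hcmvm_expand hcmvm_expand hcmvm_expand_alt
  simp only
  rw [pvMatA bits matrix PySem.Dict.empty, pvMatB bits matrix PySem.Dict.empty 0,
    pvFoldl_bump_eq_counter, pvSumCounter]
  simp [List.length_map]
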